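-- pv_equiv track=rewrite | github.com/cakemus/Discrete-Mathematics-IX1500 | task_d.py | ul_to_coords
-- ===== SOURCE A (Python) =====
-- def L(m, n):
--     return (m+1, n-1)
--
-- def U(m, n):
--     return (m+1, n+1)
--
-- def ul_to_coords(path):
--     """
--     Simulates the path based on the sequence of moves ('U' and 'L')
--     and returns the list of coordinates.
--     """
--     #start at (0, 3)
--     x, y = 7, 6
--     coordinates = [(x, y)]  #start coordinate
--
--     #apply each move in the path
--     for move in path:
--         if move == 'U':
--             x, y = U(x, y)  #use U function to move up
--         elif move == 'L':
--             x, y = L(x, y)  #use L function to move down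
--         coordinates.append((x, y))  #add the new coordinates
--
--     return coordinates
-- ===== SOURCE B (Python) =====
-- def ul_to_coords(path):
--     # Decompose into independent x/y prefix sums, then zip them back together.
--     dx = [1 if m in ('U', 'L') else 0 for m in path]
--     dy = [1 if m == 'U' else (-1 if m == 'L' else 0) for m in path]
--     xs = [7]
--     for a in dx:
--         xs.append(xs[-1] + a)
--     ys = [6]
--     for b in dy:
--         ys.append(ys[-1] + b)
--     return list(zip(xs, ys))
-- ===== Notes on version B (the rewrite author's own statement) =====
-- stated objective: alternative
-- what changed: Replaces the single mutate-and-append simulation loop with per-character step lists and two independent prefix-sum scans for x and y that are zipped into the coordinate list.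
import Mathlib
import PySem

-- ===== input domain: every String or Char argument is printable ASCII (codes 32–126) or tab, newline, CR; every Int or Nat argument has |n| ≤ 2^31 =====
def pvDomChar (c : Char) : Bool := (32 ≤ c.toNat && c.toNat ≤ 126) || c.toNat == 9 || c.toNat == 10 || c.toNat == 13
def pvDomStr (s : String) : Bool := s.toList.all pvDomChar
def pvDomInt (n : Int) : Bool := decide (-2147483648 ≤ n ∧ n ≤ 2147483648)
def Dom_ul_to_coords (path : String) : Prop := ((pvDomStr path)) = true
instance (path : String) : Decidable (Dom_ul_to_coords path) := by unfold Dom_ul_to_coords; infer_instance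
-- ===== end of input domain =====

-- B replaces A's single mutate-and-append loop by two independent prefix-sum scans (x and y) zipped together; objective: alternative decomposition.

-- ===== PORT A =====
def pyL (m n : Int) : Int × Int := (m + 1, n - 1)

def pyU (m n : Int) : Int × Int := (m + 1, n + 1)

-- the for-loop of A: current (x, y), emit the updated coordinate after each move
def ulLoopA : List Char → Int → Int → List (Int × Int)
  | [], _, _ => []
  | move :: rest, x, y =>
      let p := if move = 'U' then pyU x y else if move = 'L' then pyL x y else (x, y)
      p :: ulLoopA rest p.1 p.2

def ul_to_coords (path : String) : List (Int × Int) :=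
  (7, 6) :: ulLoopA path.toList 7 6

-- ===== PORT B =====
def stepX (m : Char) : Int := if m = 'U' ∨ m = 'L' then 1 else 0

def stepY (m : Char) : Int := if m = 'U' then 1 else if m = 'L' then -1 else 0

-- 'xs = [s]; for d in ds: xs.append(xs[-1] + d)'
def prefixScan (s : Int) : List Int → List Int
  | [] => [s]
  | d :: ds => s :: prefixScan (s + d) ds

def ul_to_coords_alt (path : String) : List (Int × Int) :=
  let dx := path.toList.map stepX
  let dy := path.toList.map stepY
  (prefixScan 7 dx).zip (prefixScan 6 dy)

-- ===== PRECONDITION & SPEC =====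
def Spec_ul_to_coords (path : String) (out : List (Int × Int)) : Prop := out = ul_to_coords_alt path
instance (path : String) (out : List (Int × Int)) : Decidable (Spec_ul_to_coords path out) := by unfold Spec_ul_to_coords; infer_instance

-- ===== CLAIM (what is proved, stated in full; the proofs are below) =====
def Claim_equal_ul_to_coords : Prop := ∀ (path : String), Dom_ul_to_coords path → Spec_ul_to_coords path (ul_to_coords path)

-- ===== LEMMAS AND PROOFS =====
theorem ulLoop_eq_zip (cs : List Char) : ∀ (x y : Int),
    (x, y) :: ulLoopA cs x y = (prefixScan x (cs.map stepX)).zip (prefixScan y (cs.map stepY)) := by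
  induction cs with
  | nil => intro x y; simp [ulLoopA, prefixScan]
  | cons m rest ih =>
      intro x y
      simp only [List.map_cons, prefixScan, List.zip_cons_cons]
      have hp : (if m = 'U' then pyU x y else if m = 'L' then pyL x y else (x, y))
          = (x + stepX m, y + stepY m) := by
        by_cases hU : m = 'U' <;> by_cases hL : m = 'L' <;>
          simp [hU, hL, pyU, pyL, stepX, stepY, sub_eq_add_neg]
      simp only [ulLoopA, hp]
      exact congrArg (List.cons (x, y)) (ih (x + stepX m) (y + stepY m))

-- ===== VERDICT (by name: the statement is the Claim_ definition above) =====
theorem ul_to_coords_spec : Claim_equal_ul_to_coords := by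
  intro path _
  show ul_to_coords path = ul_to_coords_alt path
  simp only [ul_to_coords, ul_to_coords_alt]
  exact ulLoop_eq_zip path.toList 7 6
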